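-- pv_equiv track=rewrite | github.com/th1lak-d/SocCraft | scripts/custom-win-processHunt.py | is_potentially_suspicious
-- ===== SOURCE A (Python) =====
-- def is_potentially_suspicious(entry):
--     """Simple heuristic to prioritize potentially suspicious entries."""
--     suspicious_score = 0
--
--     if entry["type"] == "running_process":
--         exe = entry.get("exe", "").lower()
--         name = entry.get("name", "").lower()
--         cmd = entry.get("command_line", "").lower()
--
--         # Suspicious locations
--         if any(path in exe for path in ["/temp/", "/tmp/", "\\users\\", "\\appdata\\", "\\programdata\\"]):
--             suspicious_score += 3
--
--         # Suspicious names
--         if any(sus in name for sus in ["powershell", "cmd", "wmic", "certutil", "bitsadmin"]):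
--             suspicious_score += 2
--
--         # Suspicious command lines
--         if any(sus in cmd for sus in ["-enc", "base64", "invoke", "downloadstring", "bypass"]):
--             suspicious_score += 3
--
--     elif entry["type"] == "bam_execution":
--         path = entry.get("path", "").lower()
--
--         # Suspicious execution paths
--         if any(sus_path in path for sus_path in ["/temp/", "/tmp/", "\\users\\", "\\appdata\\"]):
--             suspicious_score += 2
--
--     return suspicious_score
-- ===== SOURCE B (Python) =====
-- # B: instead of fixed if/elif branches probing known fields, iterate over the
-- # entry's own items once and sum the points each present field earns under the
-- # entry's type (missing fields score 0 in A too, since '' contains no keyword).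
--
-- _RULES = {
--     "running_process": {
--         "exe": (3, ["/temp/", "/tmp/", "\\users\\", "\\appdata\\", "\\programdata\\"]),
--         "name": (2, ["powershell", "cmd", "wmic", "certutil", "bitsadmin"]),
--         "command_line": (3, ["-enc", "base64", "invoke", "downloadstring", "bypass"]),
--     },
--     "bam_execution": {
--         "path": (2, ["/temp/", "/tmp/", "\\users\\", "\\appdata\\"]),
--     },
-- }
--
--
-- def _points(rules, field, value):
--     rule = rules.get(field)
--     if rule is not None and any(kw in value.lower() for kw in rule[1]):
--         return rule[0]
--     return 0
--
--
-- def is_potentially_suspicious(entry):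
--     """Simple heuristic to prioritize potentially suspicious entries."""
--     rules = _RULES.get(entry["type"], {})
--     return sum(_points(rules, field, value) for field, value in entry.items())
-- ===== Notes on version B (the rewrite author's own statement) =====
-- stated objective: alternative
-- what changed: Inverts the traversal: instead of branching on the type and probing the known fields with entry.get, B makes one pass over the entry's own items and sums the points each present field earns under a per-type rule map (a missing field scores 0 in A as well, since '' contains no keyword).
import Mathlib
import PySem

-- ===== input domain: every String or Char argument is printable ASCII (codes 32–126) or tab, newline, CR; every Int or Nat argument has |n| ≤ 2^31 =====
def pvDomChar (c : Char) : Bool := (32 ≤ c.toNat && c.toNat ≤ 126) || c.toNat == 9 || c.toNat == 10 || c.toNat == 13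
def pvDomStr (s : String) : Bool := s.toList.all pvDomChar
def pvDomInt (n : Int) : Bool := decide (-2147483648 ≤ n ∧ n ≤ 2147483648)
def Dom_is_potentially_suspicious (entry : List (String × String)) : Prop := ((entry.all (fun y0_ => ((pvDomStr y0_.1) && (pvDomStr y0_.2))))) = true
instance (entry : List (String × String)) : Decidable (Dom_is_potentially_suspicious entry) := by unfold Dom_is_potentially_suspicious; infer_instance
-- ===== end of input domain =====

-- B inverts the traversal: one pass over the entry's own items, summing the points each
-- present field earns under a per-type rule map (same cost, different decomposition).


-- ===== PORT A =====
def is_potentially_suspicious (entry : List (String × String)) : Int :=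
  let d := PySem.Dict.mk entry
  let suspicious_score : Int := 0
  if PySem.Dict.getD d "type" "" = "running_process" then
    let exe := PySem.Str.lower (PySem.Dict.getD d "exe" "")
    let name := PySem.Str.lower (PySem.Dict.getD d "name" "")
    let cmd := PySem.Str.lower (PySem.Dict.getD d "command_line" "")
    let s1 := if ["/temp/", "/tmp/", "\\users\\", "\\appdata\\", "\\programdata\\"].any
                  (fun path => PySem.Str.isIn path exe) then suspicious_score + 3 else suspicious_score
    let s2 := if ["powershell", "cmd", "wmic", "certutil", "bitsadmin"].any
                  (fun sus => PySem.Str.isIn sus name) then s1 + 2 else s1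
    let s3 := if ["-enc", "base64", "invoke", "downloadstring", "bypass"].any
                  (fun sus => PySem.Str.isIn sus cmd) then s2 + 3 else s2
    s3
  else if PySem.Dict.getD d "type" "" = "bam_execution" then
    let path := PySem.Str.lower (PySem.Dict.getD d "path" "")
    if ["/temp/", "/tmp/", "\\users\\", "\\appdata\\"].any
        (fun sus_path => PySem.Str.isIn sus_path path) then suspicious_score + 2 else suspicious_score
  else suspicious_score

-- ===== PORT B =====
-- the module-level _RULES table of Source B: type -> (field -> (points, keywords))
def pvRules : PySem.Dict String (PySem.Dict String (Int × List String)) := PySem.Dict.mk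
  [ ("running_process", PySem.Dict.mk
      [ ("exe", ((3 : Int), ["/temp/", "/tmp/", "\\users\\", "\\appdata\\", "\\programdata\\"])),
        ("name", ((2 : Int), ["powershell", "cmd", "wmic", "certutil", "bitsadmin"])),
        ("command_line", ((3 : Int), ["-enc", "base64", "invoke", "downloadstring", "bypass"])) ]),
    ("bam_execution", PySem.Dict.mk
      [ ("path", ((2 : Int), ["/temp/", "/tmp/", "\\users\\", "\\appdata\\"])) ]) ]

-- _points(rules, field, value) of Source B
def pvPoints (rules : PySem.Dict String (Int × List String)) (field value : String) : Int :=
  match PySem.Dict.get? rules field with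
  | some rule => if rule.2.any (fun kw => PySem.Str.isIn kw (PySem.Str.lower value)) then rule.1 else 0
  | none => 0

def is_potentially_suspicious_alt (entry : List (String × String)) : Int :=
  let d := PySem.Dict.mk entry
  let rules := PySem.Dict.getD pvRules (PySem.Dict.getD d "type" "") PySem.Dict.empty
  ((d.items).map (fun p => pvPoints rules p.1 p.2)).sum

-- ===== PRECONDITION & SPEC =====
-- Pre_ excludes entries without a "type" key, on which A raises KeyError (entry["type"]),
-- and association lists with duplicate keys, which do not arise from a Python dict
-- (the convention's dicts have unique keys, so this excludes no Python input).
def Pre_is_potentially_suspicious (entry : List (String × String)) : Prop :=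
  PySem.Dict.contains (PySem.Dict.mk entry) "type" = true ∧ (entry.map Prod.fst).Nodup
instance (entry : List (String × String)) : Decidable (Pre_is_potentially_suspicious entry) := by unfold Pre_is_potentially_suspicious; infer_instance
def pvWitness_is_potentially_suspicious : (List (String × String)) :=
  [("type", "running_process"), ("name", "cmd.exe")]

def Spec_is_potentially_suspicious (entry : List (String × String)) (out : Int) : Prop := out = is_potentially_suspicious_alt entry
instance (entry : List (String × String)) (out : Int) : Decidable (Spec_is_potentially_suspicious entry out) := by unfold Spec_is_potentially_suspicious; infer_instance

-- ===== CLAIM (what is proved, stated in full; the proofs are below) =====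
def Claim_equal_is_potentially_suspicious : Prop := ∀ (entry : List (String × String)), Dom_is_potentially_suspicious entry → Pre_is_potentially_suspicious entry → Spec_is_potentially_suspicious entry (is_potentially_suspicious entry)

-- ===== LEMMAS AND PROOFS =====
-- first-match lookup on a raw association list (what Dict.mk's getD computes)
def pvLk (l : List (String × String)) (k : String) : String :=
  ((l.find? (fun p => p.1 == k)).map Prod.snd).getD ""

theorem pvLk_eq_getD (l : List (String × String)) (k : String) :
    PySem.Dict.getD (PySem.Dict.mk l) k "" = pvLk l k := rfl

theorem pvLk_of_not_mem (l : List (String × String)) (k : String)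
    (h : k ∉ l.map Prod.fst) : pvLk l k = "" := by
  unfold pvLk
  have : l.find? (fun p => p.1 == k) = none := by
    rw [List.find?_eq_none]
    intro p hp hbeq
    exact h (List.mem_map.mpr ⟨p, hp, by simpa using hbeq⟩)
  simp [this]

-- the one-pass sum over the items equals the three (resp. one) probed-field contributions
theorem pvSum_run (l : List (String × String)) (hnd : (l.map Prod.fst).Nodup) :
    (l.map (fun p => pvPoints (PySem.Dict.getD pvRules "running_process" PySem.Dict.empty) p.1 p.2)).sum =
      pvPoints (PySem.Dict.getD pvRules "running_process" PySem.Dict.empty) "exe" (pvLk l "exe") +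
      pvPoints (PySem.Dict.getD pvRules "running_process" PySem.Dict.empty) "name" (pvLk l "name") +
      pvPoints (PySem.Dict.getD pvRules "running_process" PySem.Dict.empty) "command_line" (pvLk l "command_line") := by
  induction l with
  | nil => simp [pvLk]; decide
  | cons hd tl ih =>
    obtain ⟨k, v⟩ := hd
    simp only [List.map_cons, List.nodup_cons] at hnd ⊢
    rw [List.sum_cons, ih hnd.2]
    by_cases h1 : k = "exe"
    · subst h1
      have hz : pvPoints (PySem.Dict.getD pvRules "running_process" PySem.Dict.empty) "exe" (pvLk tl "exe") = 0 := by
        rw [pvLk_of_not_mem tl _ hnd.1]; decide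
      simp only [pvLk] at hz ⊢
      simp
      omega
    · by_cases h2 : k = "name"
      · subst h2
        have hz : pvPoints (PySem.Dict.getD pvRules "running_process" PySem.Dict.empty) "name" (pvLk tl "name") = 0 := by
          rw [pvLk_of_not_mem tl _ hnd.1]; decide
        simp only [pvLk] at hz ⊢
        simp
        omega
      · by_cases h3 : k = "command_line"
        · subst h3
          have hz : pvPoints (PySem.Dict.getD pvRules "running_process" PySem.Dict.empty) "command_line" (pvLk tl "command_line") = 0 := by
            rw [pvLk_of_not_mem tl _ hnd.1]; decide
          simp only [pvLk] at hz ⊢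
          simp
          omega
        · have hz : pvPoints (PySem.Dict.getD pvRules "running_process" PySem.Dict.empty) k v = 0 := by
            unfold pvPoints
            have hn : PySem.Dict.get? (PySem.Dict.getD pvRules "running_process" PySem.Dict.empty) k = none := by
              simp [pvRules, PySem.Dict.getD, Ne.symm h1, Ne.symm h2, Ne.symm h3, PySem.Dict.get?]
            rw [hn]
          simp only [pvLk] at hz ⊢
          simp [h1, h2, h3]
          omega

theorem pvSum_bam (l : List (String × String)) (hnd : (l.map Prod.fst).Nodup) :
    (l.map (fun p => pvPoints (PySem.Dict.getD pvRules "bam_execution" PySem.Dict.empty) p.1 p.2)).sum =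
      pvPoints (PySem.Dict.getD pvRules "bam_execution" PySem.Dict.empty) "path" (pvLk l "path") := by
  induction l with
  | nil => simp [pvLk]; decide
  | cons hd tl ih =>
    obtain ⟨k, v⟩ := hd
    simp only [List.map_cons, List.nodup_cons] at hnd ⊢
    rw [List.sum_cons, ih hnd.2]
    by_cases h1 : k = "path"
    · subst h1
      have hz : pvPoints (PySem.Dict.getD pvRules "bam_execution" PySem.Dict.empty) "path" (pvLk tl "path") = 0 := by
        rw [pvLk_of_not_mem tl _ hnd.1]; decide
      simp only [pvLk] at hz ⊢
      simp
      omega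
    · have hz : pvPoints (PySem.Dict.getD pvRules "bam_execution" PySem.Dict.empty) k v = 0 := by
        unfold pvPoints
        have hn : PySem.Dict.get? (PySem.Dict.getD pvRules "bam_execution" PySem.Dict.empty) k = none := by
          simp [pvRules, PySem.Dict.getD, Ne.symm h1, PySem.Dict.get?]
        rw [hn]
      simp only [pvLk] at hz ⊢
      simp [h1]
      omega

theorem pvSum_other (l : List (String × String)) (t : String)
    (h1 : t ≠ "running_process") (h2 : t ≠ "bam_execution") :
    (l.map (fun p => pvPoints (PySem.Dict.getD pvRules t PySem.Dict.empty) p.1 p.2)).sum = 0 := by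
  have hr : PySem.Dict.getD pvRules t PySem.Dict.empty = PySem.Dict.empty := by
    simp [pvRules, PySem.Dict.getD_eq_get?_getD, PySem.Dict.get?, Ne.symm h1, Ne.symm h2]
  rw [hr]
  apply List.sum_eq_zero
  intro x hx
  obtain ⟨p, _, hp⟩ := List.mem_map.mp hx
  simp [pvPoints, PySem.Dict.get?_empty] at hp
  omega

-- pvPoints at the concrete rule tables, by computation
theorem pvPoints_exe (s : String) :
    pvPoints (PySem.Dict.getD pvRules "running_process" PySem.Dict.empty) "exe" s =
      if ["/temp/", "/tmp/", "\\users\\", "\\appdata\\", "\\programdata\\"].any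
          (fun kw => PySem.Str.isIn kw (PySem.Str.lower s)) then 3 else 0 := rfl

theorem pvPoints_name (s : String) :
    pvPoints (PySem.Dict.getD pvRules "running_process" PySem.Dict.empty) "name" s =
      if ["powershell", "cmd", "wmic", "certutil", "bitsadmin"].any
          (fun kw => PySem.Str.isIn kw (PySem.Str.lower s)) then 2 else 0 := rfl

theorem pvPoints_cmd (s : String) :
    pvPoints (PySem.Dict.getD pvRules "running_process" PySem.Dict.empty) "command_line" s =
      if ["-enc", "base64", "invoke", "downloadstring", "bypass"].any
          (fun kw => PySem.Str.isIn kw (PySem.Str.lower s)) then 3 else 0 := rfl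

theorem pvPoints_path (s : String) :
    pvPoints (PySem.Dict.getD pvRules "bam_execution" PySem.Dict.empty) "path" s =
      if ["/temp/", "/tmp/", "\\users\\", "\\appdata\\"].any
          (fun kw => PySem.Str.isIn kw (PySem.Str.lower s)) then 2 else 0 := rfl

-- ===== VERDICT (by name: the statement is the Claim_ definition above) =====
theorem is_potentially_suspicious_spec : Claim_equal_is_potentially_suspicious := by
  intro entry _ hpre
  unfold Spec_is_potentially_suspicious is_potentially_suspicious is_potentially_suspicious_alt
  dsimp only
  by_cases h1 : PySem.Dict.getD (PySem.Dict.mk entry) "type" "" = "running_process"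
  · rw [if_pos h1, h1, pvSum_run entry hpre.2]
    simp only [pvLk_eq_getD, pvPoints_exe, pvPoints_name, pvPoints_cmd]
    split_ifs <;> omega
  · by_cases h2 : PySem.Dict.getD (PySem.Dict.mk entry) "type" "" = "bam_execution"
    · rw [if_neg h1, if_pos h2, h2, pvSum_bam entry hpre.2]
      simp only [pvLk_eq_getD, pvPoints_path]
      split_ifs <;> omega
    · rw [if_neg h1, if_neg h2, pvSum_other entry _ h1 h2]
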